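-- pv_equiv track=rewrite | github.com/VosidovMuhammadsaid/zypl_pass | readpass.py | sort_indices
-- ===== SOURCE A (Python) =====
-- def bubble_sort(our_list, list2):
--     for i in range(len(our_list)):
--         for j in range(len(our_list) - 1):
--             if our_list[j] > our_list[j + 1]:
--                 our_list[j], our_list[j + 1] = our_list[j + 1], our_list[j]
--                 list2[j], list2[j + 1] = list2[j + 1], list2[j]
--     return our_list, list2
--
-- def sort_indices(text):
--     l_index = []
--     l_xs = []
--     for i in range(0, int(len(text) / 5)):
--         l_index.append(text[i * 5])
--         l_xs.append(text[i * 5 + 1])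
--     l_xs, l_index = bubble_sort(l_xs, l_index)
--     return l_index
-- ===== SOURCE B (Python) =====
-- def sort_indices(text):
--     buckets = {}
--     for i in range(len(text) // 5):
--         key = text[i * 5 + 1]
--         buckets[key] = buckets.get(key, []) + [text[i * 5]]
--     return [idx for k in sorted(buckets) for idx in buckets[k]]
-- ===== Notes on version B (the rewrite author's own statement) =====
-- stated objective: simpler
-- what changed: Replaces the hand-written O(n^2) parallel-list bubble sort with a dict of per-key-character bucket lists built in one pass and concatenated in sorted key order (a stable counting/bucket sort).
import Mathlib
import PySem

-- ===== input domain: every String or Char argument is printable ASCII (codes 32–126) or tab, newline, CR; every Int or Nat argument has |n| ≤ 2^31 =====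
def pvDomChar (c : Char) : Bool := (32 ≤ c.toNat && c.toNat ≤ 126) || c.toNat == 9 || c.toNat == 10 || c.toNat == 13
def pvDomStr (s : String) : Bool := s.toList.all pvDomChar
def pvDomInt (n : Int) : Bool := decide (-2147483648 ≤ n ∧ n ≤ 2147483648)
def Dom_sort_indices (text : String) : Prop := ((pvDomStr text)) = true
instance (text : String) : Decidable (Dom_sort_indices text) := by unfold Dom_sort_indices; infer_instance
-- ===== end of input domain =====

-- B replaces A's hand-written parallel-list bubble sort by a dict of per-key-character
-- buckets concatenated in sorted key order (same stable result); objective: simpler.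

-- ===== PORT A =====
-- one inner sweep 'for j in range(len - 1)': adjacent compare-and-swap; the two parallel
-- lists l_xs/l_index (always swapped together) are carried as one list of (key, index) pairs
def pvPass : List (Char × Char) → List (Char × Char)
  | [] => []
  | [a] => [a]
  | a :: b :: t => if a.1 > b.1 then b :: pvPass (a :: t) else a :: pvPass (b :: t)
termination_by l => l.length
decreasing_by all_goals simp

-- bubble_sort: the outer 'for i in range(len(our_list))' repeats the inner sweep
def pvBubble (l : List (Char × Char)) : List (Char × Char) :=
  (List.range l.length).foldl (fun acc _ => pvPass acc) l

-- sort_indices. int(len(text)/5) is exact integer division (floordiv) for admissible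
-- lengths; the pyGetD default is never used: i*5+1 < len(text) for every i in the range.
-- Python's 1-character strings are carried as Char and rendered as singleton strings at return.
def sort_indices (text : String) : List String :=
  let cs := text.toList
  let n := PySem.Int.floordiv (PySem.Str.len text) 5
  let pairs := (PySem.List.pyRange 0 n 1).foldl
      (fun acc i => acc ++ [(PySem.List.pyGetD cs (i*5+1) ' ', PySem.List.pyGetD cs (i*5) ' ')]) []
  (pvBubble pairs).map (fun p => String.ofList [p.2])

-- ===== PORT B =====
-- buckets[key] = buckets.get(key, []) + [idx] over the blocks, then the buckets are
-- emitted in sorted(buckets) key order (same remarks on floordiv / pyGetD as in port A)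
def sort_indices_alt (text : String) : List String :=
  let cs := text.toList
  let d := (PySem.List.pyRange 0 (PySem.Int.floordiv (PySem.Str.len text) 5) 1).foldl
      (fun d i => d.modify (PySem.List.pyGetD cs (i*5+1) ' ') []
        (fun v => v ++ [PySem.List.pyGetD cs (i*5) ' '])) PySem.Dict.empty
  ((PySem.List.sorted d.keys (fun k => k) false).flatMap (fun k => d.getD k [])).map
    (fun c => String.ofList [c])

-- ===== PRECONDITION & SPEC =====
def Spec_sort_indices (text : String) (out : List String) : Prop := out = sort_indices_alt text
instance (text : String) (out : List String) : Decidable (Spec_sort_indices text out) := by unfold Spec_sort_indices; infer_instance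

-- ===== CLAIM (what is proved, stated in full; the proofs are below) =====
def Claim_equal_sort_indices : Prop := ∀ (text : String), Dom_sort_indices text → Spec_sort_indices text (sort_indices text)

-- ===== LEMMAS AND PROOFS =====

-- the extracted (key, index-char) pairs, and the same pairs tagged with their block position
def pvPs (cs : List Char) : List (Char × Char) :=
  (List.range (cs.length / 5)).map (fun i => (cs.getD (i*5+1) ' ', cs.getD (i*5) ' '))
def pvTg (cs : List Char) : List ((Char × Nat) × Char) :=
  (List.range (cs.length / 5)).map (fun i => ((cs.getD (i*5+1) ' ', i), cs.getD (i*5) ' '))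
def pvUntag (e : (Char × Nat) × Char) : Char × Char := (e.1.1, e.2)

-- strict lexicographic order on (key char, block position) tags
def pvLtB (a b : Char × Nat) : Bool := a.1 < b.1 || (a.1 == b.1 && a.2 < b.2)

-- ghost bubble pass / iterated passes on tagged elements, deciding by the tag order
def pvGPass : List ((Char × Nat) × Char) → List ((Char × Nat) × Char)
  | [] => []
  | [a] => [a]
  | a :: b :: t => if pvLtB b.1 a.1 then b :: pvGPass (a :: t) else a :: pvGPass (b :: t)
termination_by l => l.length
decreasing_by all_goals simp

def pvGIter : Nat → List ((Char × Nat) × Char) → List ((Char × Nat) × Char)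
  | 0, l => l
  | n+1, l => pvGPass (pvGIter n l)

def pvAIter : Nat → List (Char × Char) → List (Char × Char)
  | 0, l => l
  | n+1, l => pvPass (pvAIter n l)

-- the canonical stable result: buckets in increasing key order, block order inside a bucket
def pvC (cs : List Char) : List ((Char × Nat) × Char) :=
  (PySem.List.sorted (PySem.Set.ofList ((pvTg cs).map (fun e => e.1.1))) (fun k => k) false).flatMap
    (fun k => (pvTg cs).filter (fun e => e.1.1 == k))

-- stability invariant: equal key chars appear in increasing block-position order
def pvS (a b : (Char × Nat) × Char) : Prop := a.1.1 = b.1.1 → a.1.2 < b.1.2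

lemma pvCharLt (a b : Char) : a < b ↔ a.toNat < b.toNat := by
  rw [Char.lt_def, UInt32.lt_iff_toNat_lt]; rfl

lemma pvCharEq (a b : Char) : a = b ↔ a.toNat = b.toNat := by
  constructor
  · intro h; rw [h]
  · intro h; exact Char.ext (UInt32.toNat_inj.mp h)

lemma pvLtN (a b : Char × Nat) :
    pvLtB a b = true ↔ (a.1.toNat < b.1.toNat ∨ (a.1.toNat = b.1.toNat ∧ a.2 < b.2)) := by
  simp [pvLtB, pvCharLt, pvCharEq]

lemma pvLtNF (a b : Char × Nat) :
    pvLtB a b = false ↔ ¬ (a.1.toNat < b.1.toNat ∨ (a.1.toNat = b.1.toNat ∧ a.2 < b.2)) := by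
  rw [← pvLtN, Bool.not_eq_true]

lemma pvLtB_asymm {a b : Char × Nat} (h : pvLtB a b = true) (h' : pvLtB b a = true) : False := by
  rw [pvLtN] at h h'; omega

lemma pvLtB_total {a b : Char × Nat} (h : pvLtB b a = false) (hne : a ≠ b) : pvLtB a b = true := by
  rw [pvLtNF] at h; rw [pvLtN]
  rcases Nat.lt_trichotomy a.1.toNat b.1.toNat with hc | hc | hc
  · exact Or.inl hc
  · refine Or.inr ⟨hc, ?_⟩
    rcases Nat.lt_trichotomy a.2 b.2 with hp | hp | hp
    · exact hp
    · exact absurd (Prod.ext ((pvCharEq _ _).mpr hc) hp) hne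
    · exact absurd (Or.inr ⟨hc.symm, hp⟩) h
  · exact absurd (Or.inl hc) h

lemma pvGPass_perm (l : List ((Char × Nat) × Char)) : (pvGPass l).Perm l := by
  induction l using pvGPass.induct with
  | case1 => simp [pvGPass]
  | case2 a => simp [pvGPass]
  | case3 a b t hc ih =>
      rw [pvGPass, if_pos hc]
      exact (ih.cons b).trans (List.Perm.swap a b t)
  | case4 a b t hc ih =>
      rw [pvGPass, if_neg hc]
      exact ih.cons a

lemma pvGPass_append_max (l : List ((Char × Nat) × Char)) (m : (Char × Nat) × Char)
    (h : ∀ x ∈ l, pvLtB m.1 x.1 = false) : pvGPass (l ++ [m]) = pvGPass l ++ [m] := by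
  induction l using pvGPass.induct with
  | case1 => simp [pvGPass]
  | case2 a =>
      have ha : pvLtB m.1 a.1 = false := h a (by simp)
      simp only [List.cons_append, List.nil_append, pvGPass, ha, Bool.false_eq_true, if_false]
  | case3 a b t hc ih =>
      have h' : ∀ x ∈ a :: t, pvLtB m.1 x.1 = false := by
        intro x hx
        rcases List.mem_cons.mp hx with rfl | hx
        · exact h x (by simp)
        · exact h x (by simp [hx])
      simp only [List.cons_append] at *
      rw [pvGPass, if_pos hc, pvGPass, if_pos hc, ih h']
      simp
  | case4 a b t hc ih =>
      have h' : ∀ x ∈ b :: t, pvLtB m.1 x.1 = false := by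
        intro x hx
        rcases List.mem_cons.mp hx with rfl | hx
        · exact h x (by simp)
        · exact h x (by simp [hx])
      simp only [List.cons_append] at *
      rw [pvGPass, if_neg hc, pvGPass, if_neg hc, ih h']
      simp

lemma pvGPass_max (l : List ((Char × Nat) × Char)) (hne : l ≠ []) :
    ∃ t m, pvGPass l = t ++ [m] ∧ ∀ x ∈ l, pvLtB m.1 x.1 = false := by
  induction l using pvGPass.induct with
  | case1 => exact absurd rfl hne
  | case2 a =>
      refine ⟨[], a, by simp [pvGPass], ?_⟩
      intro x hx; simp at hx; subst hx
      rw [pvLtNF]; omega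
  | case3 a b t hc ih =>
      obtain ⟨t', m, he, hm⟩ := ih (by simp)
      refine ⟨b :: t', m, by rw [pvGPass, if_pos hc, he]; simp, ?_⟩
      intro x hx
      rcases List.mem_cons.mp hx with rfl | hx
      · exact hm x (by simp)
      · rcases List.mem_cons.mp hx with rfl | hx
        · -- x = b : m ≥ a and b < a give m ≥ b
          have h1 := hm a (by simp)
          rw [pvLtN] at hc; rw [pvLtNF] at h1 ⊢; omega
        · exact hm x (by simp [hx])
  | case4 a b t hc ih =>
      rw [Bool.not_eq_true] at hc
      obtain ⟨t', m, he, hm⟩ := ih (by simp)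
      refine ⟨a :: t', m, by rw [pvGPass, if_neg (by simp [hc]), he]; simp, ?_⟩
      intro x hx
      rcases List.mem_cons.mp hx with rfl | hx
      · -- x = a : m ≥ b and a ≤ b give m ≥ a
        have h1 := hm b (by simp)
        rw [pvLtNF] at hc h1 ⊢; omega
      · rcases List.mem_cons.mp hx with rfl | hx
        · exact hm x (by simp)
        · exact hm x (by simp [hx])

lemma pvGIter_nil (n : Nat) : pvGIter n [] = [] := by
  induction n with
  | zero => rfl
  | succ n ih => rw [pvGIter, ih]; simp [pvGPass]

lemma pvGIter_perm (n : Nat) (l : List ((Char × Nat) × Char)) : (pvGIter n l).Perm l := by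
  induction n with
  | zero => exact List.Perm.refl l
  | succ n ih => exact (pvGPass_perm _).trans ih

lemma pvGIter_succ_comm (n : Nat) (l : List ((Char × Nat) × Char)) :
    pvGIter (n+1) l = pvGIter n (pvGPass l) := by
  induction n generalizing l with
  | zero => rfl
  | succ n ih => rw [pvGIter, ih, pvGIter]

lemma pvGIter_append_max (n : Nat) (l : List ((Char × Nat) × Char)) (m : (Char × Nat) × Char)
    (h : ∀ x ∈ l, pvLtB m.1 x.1 = false) : pvGIter n (l ++ [m]) = pvGIter n l ++ [m] := by
  induction n with
  | zero => rfl
  | succ n ih =>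
      rw [pvGIter, pvGIter, ih]
      exact pvGPass_append_max _ m (fun x hx => h x ((pvGIter_perm n l).subset hx))

lemma pvGIter_sorts (n : Nat) (l : List ((Char × Nat) × Char)) (h : l.length ≤ n) :
    (pvGIter n l).Pairwise (fun a b => pvLtB b.1 a.1 = false) := by
  induction n generalizing l with
  | zero =>
      have : l = [] := List.length_eq_zero_iff.mp (Nat.le_zero.mp h)
      subst this
      exact List.Pairwise.nil
  | succ n ih =>
      rcases eq_or_ne l [] with hl | hl
      · subst hl; rw [pvGIter_nil]; exact List.Pairwise.nil
      · obtain ⟨t', m, he, hm⟩ := pvGPass_max l hl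
        rw [pvGIter_succ_comm, he, pvGIter_append_max n t' m
          (fun x hx => hm x ((he ▸ pvGPass_perm l).subset (by simp [hx])))]
        have hlen : t'.length + 1 = l.length := by
          have hle := (pvGPass_perm l).length_eq
          rw [he] at hle
          simpa using hle
        rw [List.pairwise_append]
        refine ⟨ih t' (by omega), List.Pairwise.nil.cons (by simp), ?_⟩
        intro x hx y hy
        have hxt : x ∈ t' := (pvGIter_perm n t').subset hx
        have hxl : x ∈ l := (he ▸ pvGPass_perm l).subset (by simp [hxt])
        rw [List.mem_singleton] at hy; subst hy
        exact hm x hxl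

lemma pvStable (l : List ((Char × Nat) × Char)) (h : l.Pairwise pvS) :
    (pvGPass l).map pvUntag = pvPass (l.map pvUntag) ∧ (pvGPass l).Pairwise pvS := by
  induction l using pvGPass.induct with
  | case1 => simp [pvGPass, pvPass]
  | case2 a => simp [pvGPass, pvPass]
  | case3 a b t hc ih =>
      rw [List.pairwise_cons] at h
      obtain ⟨hab, h2⟩ := h
      rw [List.pairwise_cons] at h2
      obtain ⟨hbt, ht⟩ := h2
      have hS : (a :: t).Pairwise pvS :=
        List.pairwise_cons.mpr ⟨fun x hx => (hab x (by simp [hx])), ht⟩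
      obtain ⟨ihm, ihp⟩ := ih hS
      -- the swap really compares the key chars: a tie is excluded by the invariant
      have hkey : b.1.1 < a.1.1 := by
        rw [pvLtN] at hc
        rcases hc with hc | ⟨hc, hp⟩
        · exact (pvCharLt _ _).mpr hc
        · exact absurd (hab b (by simp) ((pvCharEq _ _).mpr hc.symm)) (by omega)
      have hky : (pvUntag a).1 > (pvUntag b).1 := hkey
      constructor
      · simp only [List.map_cons] at ihm ⊢
        rw [pvGPass, if_pos hc, List.map_cons, pvPass, if_pos hky, ihm]
      · rw [pvGPass, if_pos hc]
        refine List.pairwise_cons.mpr ⟨?_, ihp⟩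
        intro x hx
        have hx' : x ∈ a :: t := (pvGPass_perm _).subset hx
        rcases List.mem_cons.mp hx' with rfl | hx'
        · intro hbe; exact absurd hkey (by simp [hbe])
        · exact hbt x hx'
  | case4 a b t hc ih =>
      rw [List.pairwise_cons] at h
      obtain ⟨hab, h2⟩ := h
      rw [List.pairwise_cons] at h2
      obtain ⟨hbt, ht⟩ := h2
      have hS : (b :: t).Pairwise pvS := List.pairwise_cons.mpr ⟨hbt, ht⟩
      obtain ⟨ihm, ihp⟩ := ih hS
      have hcf : pvLtB b.1 a.1 = false := by
        rw [← Bool.not_eq_true]; exact hc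
      have hkey : ¬ b.1.1 < a.1.1 := by
        rw [pvLtNF] at hcf
        intro hlt; exact hcf (Or.inl ((pvCharLt _ _).mp hlt))
      have hky : ¬ (pvUntag a).1 > (pvUntag b).1 := hkey
      constructor
      · simp only [List.map_cons] at ihm ⊢
        rw [pvGPass, if_neg hc, List.map_cons, pvPass, if_neg hky, ihm]
      · rw [pvGPass, if_neg hc]
        refine List.pairwise_cons.mpr ⟨?_, ihp⟩
        intro x hx
        have hx' : x ∈ b :: t := (pvGPass_perm _).subset hx
        rcases List.mem_cons.mp hx' with rfl | hx'
        · exact hab x (by simp)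
        · exact hab x (by simp [hx'])

lemma pvStableIter (n : Nat) (l : List ((Char × Nat) × Char)) (h : l.Pairwise pvS) :
    (pvGIter n l).map pvUntag = pvAIter n (l.map pvUntag) ∧ (pvGIter n l).Pairwise pvS := by
  induction n with
  | zero => exact ⟨rfl, h⟩
  | succ n ih =>
      obtain ⟨ihm, ihp⟩ := ih
      obtain ⟨hm, hp⟩ := pvStable (pvGIter n l) ihp
      exact ⟨by rw [pvGIter, hm, ihm, pvAIter], hp⟩

lemma pvEqOfPerm (l₁ l₂ : List ((Char × Nat) × Char)) (hp : l₁.Perm l₂)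
    (h₁ : l₁.Pairwise (fun a b => pvLtB a.1 b.1 = true))
    (h₂ : l₂.Pairwise (fun a b => pvLtB a.1 b.1 = true)) : l₁ = l₂ := by
  induction l₁ generalizing l₂ with
  | nil => exact (List.perm_nil.mp hp.symm).symm
  | cons a t₁ ih =>
      rcases l₂ with _ | ⟨b, t₂⟩
      · exact absurd hp (by simp)
      · rw [List.pairwise_cons] at h₁ h₂
        have hab : a = b := by
          rcases List.mem_cons.mp (hp.subset (List.mem_cons_self)) with h | ha2
          · exact h
          · exfalso
            have hba : pvLtB b.1 a.1 = true := h₂.1 a ha2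
            rcases List.mem_cons.mp (hp.symm.subset (List.mem_cons_self)) with h | hb1
            · rw [h] at hba; rw [pvLtN] at hba; omega
            · exact pvLtB_asymm (h₁.1 b hb1) hba
        subst hab
        rw [ih t₂ hp.cons_inv h₁.2 h₂.2]

-- the outer loop of bubble_sort is pvAIter
lemma pvFoldIter (n : Nat) (l : List (Char × Char)) :
    (List.range n).foldl (fun acc _ => pvPass acc) l = pvAIter n l := by
  induction n with
  | zero => rfl
  | succ n ih => rw [List.range_succ, List.foldl_append, ih]; rfl

lemma pvTg_untag (cs : List Char) : (pvTg cs).map pvUntag = pvPs cs := by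
  simp [pvTg, pvPs, pvUntag]

lemma pvTg_pos (cs : List Char) : (pvTg cs).Pairwise (fun a b => a.1.2 < b.1.2) := by
  rw [pvTg, List.pairwise_map]
  exact List.pairwise_lt_range

lemma pvTg_pairwiseS (cs : List Char) : (pvTg cs).Pairwise pvS :=
  (pvTg_pos cs).imp (fun {a b} h => (fun _ => h : pvS a b))

lemma pvTg_tags_nodup (cs : List Char) : ((pvTg cs).map (fun e => e.1)).Nodup := by
  rw [pvTg, List.map_map]
  refine List.Nodup.map_on ?_ List.nodup_range
  intro x _ y _ h
  simpa using congrArg Prod.snd h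

-- strictly tag-sorted form of the bubble result
lemma pvGIter_strict (cs : List Char) :
    (pvGIter ((pvTg cs).length) (pvTg cs)).Pairwise (fun a b => pvLtB a.1 b.1 = true) := by
  have hs := pvGIter_sorts ((pvTg cs).length) (pvTg cs) le_rfl
  have hnd : ((pvGIter ((pvTg cs).length) (pvTg cs)).map (fun e => e.1)).Nodup :=
    (((pvGIter_perm _ _).map (fun e => e.1)).nodup_iff).mpr (pvTg_tags_nodup cs)
  have hne : (pvGIter ((pvTg cs).length) (pvTg cs)).Pairwise (fun a b => a.1 ≠ b.1) :=
    List.pairwise_map.mp hnd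
  exact (hs.and hne).imp (fun {a b} h => pvLtB_total h.1 h.2)

lemma pvFlatMap_pairwise {T : Type} {R : T → T → Prop} (kl : List Char) (f : Char → List T)
    (hkl : kl.Pairwise (· < ·)) (hin : ∀ k, (f k).Pairwise R)
    (hcross : ∀ k k', k < k' → ∀ x ∈ f k, ∀ y ∈ f k', R x y) :
    (kl.flatMap f).Pairwise R := by
  induction kl with
  | nil => simp
  | cons k kt ih =>
      rw [List.pairwise_cons] at hkl
      rw [List.flatMap_cons, List.pairwise_append]
      refine ⟨hin k, ih hkl.2, ?_⟩
      intro x hx y hy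
      rw [List.mem_flatMap] at hy
      obtain ⟨k', hk', hy⟩ := hy
      exact hcross k k' (hkl.1 k' hk') x hx y hy

lemma pvFlatMap_congr {α β : Type} (kl : List α) (f g : α → List β) (h : ∀ k ∈ kl, f k = g k) :
    kl.flatMap f = kl.flatMap g := by
  induction kl with
  | nil => rfl
  | cons k kt ih =>
      rw [List.flatMap_cons, List.flatMap_cons, h k (by simp),
        ih (fun x hx => h x (by simp [hx]))]

lemma pvFlatMapFilter_perm (kl : List Char) (tg : List ((Char × Nat) × Char))
    (hnd : kl.Nodup) (hcov : ∀ x ∈ tg, x.1.1 ∈ kl) :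
    (kl.flatMap (fun k => tg.filter (fun e => e.1.1 == k))).Perm tg := by
  induction kl generalizing tg with
  | nil =>
      rcases tg with _ | ⟨x, t⟩
      · simp
      · exact absurd (hcov x (by simp)) (by simp)
  | cons k kt ih =>
      rw [List.flatMap_cons]
      rw [List.nodup_cons] at hnd
      have hcongr : ∀ k' ∈ kt, tg.filter (fun e => e.1.1 == k')
          = (tg.filter (fun e => !(e.1.1 == k))).filter (fun e => e.1.1 == k') := by
        intro k' hk'
        have hkk : k' ≠ k := fun h => hnd.1 (h ▸ hk')
        rw [List.filter_filter]
        apply List.filter_congr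
        intro x _
        by_cases he : x.1.1 = k'
        · simp [he, hkk]
        · simp [he]
      rw [pvFlatMap_congr kt _ _ hcongr]
      have hcov' : ∀ x ∈ tg.filter (fun e => !(e.1.1 == k)), x.1.1 ∈ kt := by
        intro x hx
        rw [List.mem_filter] at hx
        have hm := hcov x hx.1
        rcases List.mem_cons.mp hm with h | h
        · exact absurd h (by simpa using hx.2)
        · exact h
      exact (List.Perm.append_left _ (ih _ hnd.2 hcov')).trans
        (List.filter_append_perm _ tg)

lemma pvC_pairwise (cs : List Char) : (pvC cs).Pairwise (fun a b => pvLtB a.1 b.1 = true) := by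
  rw [pvC]
  apply pvFlatMap_pairwise
  · exact PySem.List.sorted_ofList_pairwise_lt _
  · intro k
    have hpos : ((pvTg cs).filter (fun e => e.1.1 == k)).Pairwise (fun a b => a.1.2 < b.1.2) :=
      List.Pairwise.sublist List.filter_sublist (pvTg_pos cs)
    refine List.Pairwise.imp_of_mem ?_ hpos
    intro a b ha hb hlt
    rw [List.mem_filter] at ha hb
    have hak : a.1.1 = k := by simpa using ha.2
    have hbk : b.1.1 = k := by simpa using hb.2
    rw [pvLtN]
    exact Or.inr ⟨(pvCharEq _ _).mp (hak.trans hbk.symm), hlt⟩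
  · intro k k' hkk x hx y hy
    rw [List.mem_filter] at hx hy
    have hxk : x.1.1 = k := by simpa using hx.2
    have hyk : y.1.1 = k' := by simpa using hy.2
    rw [pvLtN]
    exact Or.inl (by rw [hxk, hyk]; exact (pvCharLt _ _).mp hkk)

lemma pvC_perm (cs : List Char) : (pvC cs).Perm (pvTg cs) := by
  rw [pvC]
  apply pvFlatMapFilter_perm
  · exact ((PySem.List.sorted_perm _ _ _).nodup_iff).mpr (PySem.Set.nodup_ofList _)
  · intro x hx
    rw [PySem.List.mem_sorted, PySem.Set.mem_ofList]
    exact List.mem_map_of_mem hx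

lemma pvC_eq_bubble (cs : List Char) : pvC cs = pvGIter ((pvTg cs).length) (pvTg cs) := by
  refine pvEqOfPerm _ _ ?_ (pvC_pairwise cs) (pvGIter_strict cs)
  exact (pvC_perm cs).trans (pvGIter_perm _ _).symm

lemma pvFloordiv (text : String) :
    PySem.Int.floordiv (PySem.Str.len text) 5 = ((text.toList.length / 5 : Nat) : Int) := by
  rw [PySem.Str.len_eq]
  exact_mod_cast PySem.Int.floordiv_natCast text.toList.length 5

-- port A computes the bubble result of the tagged pairs
lemma pvA_eq (text : String) :
    sort_indices text
      = (pvGIter ((pvTg text.toList).length) (pvTg text.toList)).map (fun e => String.ofList [e.2]) := by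
  simp only [sort_indices]
  rw [pvFloordiv, PySem.List.pyRange_zero_natCast, List.foldl_map,
    PySem.List.foldl_append_singleton_eq_map, List.nil_append]
  have hps : (List.range (text.toList.length / 5)).map
      (fun k : Nat => (PySem.List.pyGetD text.toList ((k : Int)*5+1) ' ',
        PySem.List.pyGetD text.toList ((k : Int)*5) ' ')) = pvPs text.toList := by
    rw [pvPs]
    apply List.map_congr_left
    intro k _
    have e1 : ((k : Int)*5+1) = ((k*5+1 : Nat) : Int) := by push_cast; ring
    have e2 : ((k : Int)*5) = ((k*5 : Nat) : Int) := by push_cast; ring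
    rw [e1, e2, PySem.List.pyGetD_natCast, PySem.List.pyGetD_natCast]
  rw [hps, pvBubble, pvFoldIter]
  have hiter := (pvStableIter ((pvTg text.toList).length) (pvTg text.toList)
    (pvTg_pairwiseS text.toList)).1
  rw [pvTg_untag] at hiter
  have hlen : (pvPs text.toList).length = (pvTg text.toList).length := by
    simp [pvPs, pvTg]
  rw [hlen, ← hiter, List.map_map]
  rfl

-- port B computes the canonical bucket result
lemma pvB_eq (text : String) :
    sort_indices_alt text = (pvC text.toList).map (fun e => String.ofList [e.2]) := by
  simp only [sort_indices_alt]
  rw [pvFloordiv, PySem.List.pyRange_zero_natCast, List.foldl_map]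
  have hfold : (List.range (text.toList.length / 5)).foldl
      (fun d (k : Nat) => d.modify (PySem.List.pyGetD text.toList ((k : Int)*5+1) ' ') []
        (fun v => v ++ [PySem.List.pyGetD text.toList ((k : Int)*5) ' '])) PySem.Dict.empty
      = (pvPs text.toList).foldl (fun d p => d.modify p.1 [] (fun v => v ++ [p.2]))
          PySem.Dict.empty := by
    rw [pvPs, List.foldl_map]
    apply PySem.List.foldl_congr_mem
    intro d k _
    have e1 : ((k : Int)*5+1) = ((k*5+1 : Nat) : Int) := by push_cast; ring
    have e2 : ((k : Int)*5) = ((k*5 : Nat) : Int) := by push_cast; ring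
    rw [e1, e2, PySem.List.pyGetD_natCast, PySem.List.pyGetD_natCast]
  rw [hfold]
  have hkeys : ((pvPs text.toList).foldl (fun d p => d.modify p.1 [] (fun v => v ++ [p.2]))
      PySem.Dict.empty).keys = PySem.Set.ofList ((pvPs text.toList).map (fun p => p.1)) := by
    rw [PySem.Dict.keys_foldl_modify_key (pvPs text.toList) (fun p => p.1) []
      (fun _ p => (fun v => v ++ [p.2])) PySem.Dict.empty, PySem.Dict.keys_empty]
    exact PySem.Set.update_empty _
  have hgetd : ∀ k, ((pvPs text.toList).foldl (fun d p => d.modify p.1 [] (fun v => v ++ [p.2]))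
      PySem.Dict.empty).getD k []
      = ((pvPs text.toList).filter (fun p => p.1 == k)).map (fun p => p.2) := by
    intro k
    rw [PySem.Dict.getD_foldl_modify_append, PySem.Dict.getD_empty, List.nil_append]
  rw [hkeys]
  have hklist : (pvPs text.toList).map (fun p => p.1) = (pvTg text.toList).map (fun e => e.1.1) := by
    simp [pvPs, pvTg, List.map_map]
  have hbucket : ∀ k, ((pvPs text.toList).filter (fun p => p.1 == k)).map (fun p => p.2)
      = ((pvTg text.toList).filter (fun e => e.1.1 == k)).map (fun e => e.2) := by
    intro k
    rw [← pvTg_untag, List.filter_map, List.map_map]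
    rfl
  rw [pvC, List.map_flatMap, List.map_flatMap, hklist]
  apply pvFlatMap_congr
  intro k _
  rw [hgetd k, hbucket k, List.map_map]
  rfl

-- ===== VERDICT (by name: the statement is the Claim_ definition above) =====
theorem sort_indices_spec : Claim_equal_sort_indices := by
  intro text _
  unfold Spec_sort_indices
  rw [pvA_eq, pvB_eq, pvC_eq_bubble]
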